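-- pv_equiv track=rewrite | github.com/Former/Python_simple | nandgame.py | MULTI_BIT_ADD
-- ===== SOURCE A (Python) =====
-- def NAND(a, b):
--     if a:
--         if b:
--             return 0
--     return 1
--
-- def INV(a):
--     return NAND(a, a)
--
-- def AND(a,b):
--     return INV(NAND(a, b))
--
-- def OR(a, b):
--     return NAND(INV(a), INV(b))
--
-- def XOR(a, b):
--     return AND(OR(a, b), NAND(a, b))
--
-- def HALF_ADD(a, b):
--     return AND(a, b), XOR(a, b)
--
-- def FULL_ADD(a, b, c):
--     h,l = HALF_ADD(a, b)
--     h1,l1 = HALF_ADD(l, c)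
--     return OR(h1, h), l1
--
-- def MULTI_BIT_ADD(a, b, c):
--     h = 0
--     result = [0]*len(a)
--     for i in range(len(a)):
--         h, l = FULL_ADD(a[i], b[i], c)
--         result[i] = l
--         c = h
--     return h, result
-- ===== SOURCE B (Python) =====
-- def MULTI_BIT_ADD(a, b, c):
--     # Arithmetic re-implementation: pack the truthy bits of a and b (and the
--     # carry-in) into one integer sum, then read the result bits back out.
--     s = 1 if c else 0
--     for i in range(len(a)):
--         if a[i]:
--             s += 1 << i
--         if b[i]:
--             s += 1 << i
--     n = len(a)
--     return (s >> n) & 1, [(s >> i) & 1 for i in range(n)]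
-- ===== Notes on version B (the rewrite author's own statement) =====
-- stated objective: simpler
-- what changed: Replaces the per-bit NAND-gate ripple-carry loop (gate helpers, mutable carry and result slots) with integer arithmetic: pack the truthy bits into one integer sum and read result bits and carry-out back out by shifting.
-- intended difference: On empty a with truthy carry-in c, A returns carry 0 (h keeps its initial value, ignoring c) while B returns carry 1, the carry a zero-width ripple adder should pass through. — e.g. on MULTI_BIT_ADD([], [], 1): A returns (0, []), B returns (1, [])
import Mathlib
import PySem

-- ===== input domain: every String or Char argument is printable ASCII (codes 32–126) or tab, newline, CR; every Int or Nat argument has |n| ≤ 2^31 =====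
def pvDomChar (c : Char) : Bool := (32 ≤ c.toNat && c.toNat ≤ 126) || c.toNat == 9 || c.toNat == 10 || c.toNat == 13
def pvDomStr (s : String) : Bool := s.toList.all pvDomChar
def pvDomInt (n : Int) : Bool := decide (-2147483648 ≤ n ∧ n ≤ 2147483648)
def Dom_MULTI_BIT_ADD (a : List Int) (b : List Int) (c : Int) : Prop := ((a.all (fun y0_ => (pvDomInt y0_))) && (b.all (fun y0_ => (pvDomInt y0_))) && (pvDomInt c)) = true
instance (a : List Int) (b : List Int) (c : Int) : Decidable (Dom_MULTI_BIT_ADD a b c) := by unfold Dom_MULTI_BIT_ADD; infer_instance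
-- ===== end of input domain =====

-- B replaces the gate-level ripple-carry loop by integer arithmetic (pack bits into a sum, extract bits);
-- on empty a with truthy c, A returns carry 0 while B returns the pass-through carry 1 (see D_).


-- ===== PORT A =====
def NANDg (a b : Int) : Int := if a ≠ 0 then (if b ≠ 0 then 0 else 1) else 1
def INVg (a : Int) : Int := NANDg a a
def ANDg (a b : Int) : Int := INVg (NANDg a b)
def ORg (a b : Int) : Int := NANDg (INVg a) (INVg b)
def XORg (a b : Int) : Int := ANDg (ORg a b) (NANDg a b)
def HALF_ADDg (a b : Int) : Int × Int := (ANDg a b, XORg a b)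
def FULL_ADDg (a b c : Int) : Int × Int :=
  let hl := HALF_ADDg a b
  let hl1 := HALF_ADDg hl.2 c
  (ORg hl1.1 hl.1, hl1.2)

-- literal port of A's loop; result[i] = l is List.set (i is always 0 ≤ i < result.length here,
-- so List.set is exact), b[i] is pyGetD (in range under Pre_, where it is exact)
def rippleLoop (a : List Int) (b : List Int) (c : Int) : Int × List Int × Int :=
  (PySem.List.pyRange 0 a.length 1).foldl
    (fun (st : Int × List Int × Int) i =>
      let hl := FULL_ADDg (PySem.List.pyGetD a i 0) (PySem.List.pyGetD b i 0) st.2.2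
      (hl.1, st.2.1.set i.toNat hl.2, hl.1))
    (0, List.replicate a.length 0, c)

def MULTI_BIT_ADD (a : List Int) (b : List Int) (c : Int) : Int × List Int :=
  ((rippleLoop a b c).1, (rippleLoop a b c).2.1)

-- ===== PORT B =====
-- the accumulation loop of Source B (s after the for-loop)
def bitSum (a : List Int) (b : List Int) (c : Int) : Int :=
  (PySem.List.pyRange 0 a.length 1).foldl
    (fun s i =>
      let s1 := if PySem.List.pyGetD a i 0 ≠ 0 then s + 2 ^ i.toNat else s
      if PySem.List.pyGetD b i 0 ≠ 0 then s1 + 2 ^ i.toNat else s1)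
    (if c ≠ 0 then 1 else 0)

def MULTI_BIT_ADD_alt (a : List Int) (b : List Int) (c : Int) : Int × List Int :=
  (PySem.Int.mod (PySem.Int.floordiv (bitSum a b c) (2 ^ a.length)) 2,
   (PySem.List.pyRange 0 a.length 1).map
     (fun i => PySem.Int.mod (PySem.Int.floordiv (bitSum a b c) (2 ^ i.toNat)) 2))

-- ===== PRECONDITION & SPEC =====
-- Pre_ excludes exactly the inputs where b is shorter than a, on which b[i] raises IndexError in both programs.
def Pre_MULTI_BIT_ADD (a : List Int) (b : List Int) (c : Int) : Prop := a.length ≤ b.length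
instance (a : List Int) (b : List Int) (c : Int) : Decidable (Pre_MULTI_BIT_ADD a b c) := by unfold Pre_MULTI_BIT_ADD; infer_instance
def pvWitness_MULTI_BIT_ADD : List Int × List Int × Int := ([1, 0, 1], [0, 1, 1], 1)

-- On empty a with truthy carry-in c, A returns carry 0 (h keeps its initial value, ignoring c)
-- while B returns carry 1, the carry a zero-width ripple adder should pass through.
def D_MULTI_BIT_ADD (a : List Int) (b : List Int) (c : Int) : Prop := a = [] ∧ c ≠ 0
instance (a : List Int) (b : List Int) (c : Int) : Decidable (D_MULTI_BIT_ADD a b c) := by unfold D_MULTI_BIT_ADD; infer_instance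
def Spec_MULTI_BIT_ADD (a : List Int) (b : List Int) (c : Int) (out : Int × List Int) : Prop := ¬ D_MULTI_BIT_ADD a b c → out = MULTI_BIT_ADD_alt a b c
instance (a : List Int) (b : List Int) (c : Int) (out : Int × List Int) : Decidable (Spec_MULTI_BIT_ADD a b c out) := by unfold Spec_MULTI_BIT_ADD; infer_instance
def pvDiffWitness_MULTI_BIT_ADD : List Int × List Int × Int := ([], [], 1)
def pvDiffWitnessOut_MULTI_BIT_ADD : (Int × List Int) × (Int × List Int) := ((0, []), (1, []))

-- ===== CLAIM (what is proved, stated in full; the proofs are below) =====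
def Claim_unchanged_MULTI_BIT_ADD : Prop := ∀ (a : List Int) (b : List Int) (c : Int), Dom_MULTI_BIT_ADD a b c → Pre_MULTI_BIT_ADD a b c → Spec_MULTI_BIT_ADD a b c (MULTI_BIT_ADD a b c)
def Claim_changed_MULTI_BIT_ADD : Prop := Dom_MULTI_BIT_ADD (pvDiffWitness_MULTI_BIT_ADD.1) (pvDiffWitness_MULTI_BIT_ADD.2.1) (pvDiffWitness_MULTI_BIT_ADD.2.2) ∧ Pre_MULTI_BIT_ADD (pvDiffWitness_MULTI_BIT_ADD.1) (pvDiffWitness_MULTI_BIT_ADD.2.1) (pvDiffWitness_MULTI_BIT_ADD.2.2) ∧ D_MULTI_BIT_ADD (pvDiffWitness_MULTI_BIT_ADD.1) (pvDiffWitness_MULTI_BIT_ADD.2.1) (pvDiffWitness_MULTI_BIT_ADD.2.2) ∧ MULTI_BIT_ADD (pvDiffWitness_MULTI_BIT_ADD.1) (pvDiffWitness_MULTI_BIT_ADD.2.1) (pvDiffWitness_MULTI_BIT_ADD.2.2) = pvDiffWitnessOut_MULTI_BIT_ADD.1 ∧ MULTI_BIT_ADD_alt (pvDiffWitness_MULTI_BIT_ADD.1)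 (pvDiffWitness_MULTI_BIT_ADD.2.1) (pvDiffWitness_MULTI_BIT_ADD.2.2) = pvDiffWitnessOut_MULTI_BIT_ADD.2 ∧ pvDiffWitnessOut_MULTI_BIT_ADD.1 ≠ pvDiffWitnessOut_MULTI_BIT_ADD.2
def Claim_exact_MULTI_BIT_ADD : Prop := ∀ (a : List Int) (b : List Int) (c : Int), Dom_MULTI_BIT_ADD a b c → Pre_MULTI_BIT_ADD a b c → D_MULTI_BIT_ADD a b c → MULTI_BIT_ADD a b c ≠ MULTI_BIT_ADD_alt a b c

-- ===== LEMMAS AND PROOFS =====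

-- truthiness bit of an int
def tb (x : Int) : Int := if x ≠ 0 then 1 else 0

-- partial bit sum: carry-in bit plus the bits of a and b below position k
def S (a b : List Int) (c : Int) : Nat → Int
  | 0 => tb c
  | k + 1 => S a b c k + (tb (a.getD k 0) + tb (b.getD k 0)) * 2 ^ k

theorem tb_bounds (x : Int) : 0 ≤ tb x ∧ tb x ≤ 1 := by
  unfold tb; split <;> simp

theorem S_bounds (a b : List Int) (c : Int) (k : Nat) : 0 ≤ S a b c k ∧ S a b c k < 2 ^ (k + 1) := by
  induction k with
  | zero =>
    have := tb_bounds c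
    simp [S]; omega
  | succ k ih =>
    have h1 := tb_bounds (a.getD k 0)
    have h2 := tb_bounds (b.getD k 0)
    have hp : (0:Int) < 2 ^ k := by positivity
    simp only [S, pow_succ]
    have hmul0 : 0 ≤ (tb (a.getD k 0) + tb (b.getD k 0)) * 2 ^ k := by nlinarith
    have hmul2 : (tb (a.getD k 0) + tb (b.getD k 0)) * 2 ^ k ≤ 2 * 2 ^ k := by nlinarith
    have hps : (2:Int) ^ (k + 1) = 2 ^ k * 2 := pow_succ 2 k
    rw [hps] at ih
    constructor <;> linarith [ih.1, ih.2]

theorem full_add_eq (x y z : Int) :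
    FULL_ADDg x y z = ((tb x + tb y + tb z) / 2, (tb x + tb y + tb z) % 2) := by
  by_cases hx : x = 0 <;> by_cases hy : y = 0 <;> by_cases hz : z = 0 <;>
    simp [FULL_ADDg, HALF_ADDg, ORg, XORg, ANDg, INVg, NANDg, tb, hx, hy, hz]

-- division/bit extraction after adding T * 2^k to a remainder r < 2^k
theorem div_shift (T r : Int) (k : Nat) (hr : 0 ≤ r) (hr2 : r < 2 ^ k) :
    (T * 2 ^ k + r) / 2 ^ (k + 1) = T / 2 ∧ (T * 2 ^ k + r) / 2 ^ k % 2 = T % 2 := by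
  have hp : (0:Int) < 2 ^ k := by positivity
  have hTd := Int.ediv_add_emod T 2
  have hm0 : 0 ≤ T % 2 := Int.emod_nonneg T (by norm_num)
  have hm1 : T % 2 < 2 := Int.emod_lt_of_pos T (by norm_num)
  set d := T / 2 with hd
  set m := T % 2 with hm
  have hrepr : T * 2 ^ k + r = d * 2 ^ (k + 1) + (m * 2 ^ k + r) := by
    rw [pow_succ]; ring_nf; nlinarith [hTd]
  constructor
  · rw [hrepr]
    have hlt : m * 2 ^ k + r < 2 ^ (k + 1) := by rw [pow_succ]; nlinarith
    have hge : 0 ≤ m * 2 ^ k + r := by nlinarith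
    have hp1 : (0:Int) < 2 ^ (k + 1) := by positivity
    rw [add_comm, Int.add_mul_ediv_right _ _ (ne_of_gt hp1), Int.ediv_eq_zero_of_lt hge hlt]
    omega
  · have : (T * 2 ^ k + r) / 2 ^ k = T := by
      rw [add_comm, Int.add_mul_ediv_right _ _ (ne_of_gt hp), Int.ediv_eq_zero_of_lt hr hr2]
      omega
    rw [this]

-- low bits are stable once written: bit i of S m equals bit i of S (i+1), for i < m
theorem S_bit_stable (a b : List Int) (c : Int) (i m : Nat) (h : i < m) :
    S a b c m / 2 ^ i % 2 = S a b c (i + 1) / 2 ^ i % 2 := by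
  induction m with
  | zero => omega
  | succ m ih =>
    rcases Nat.lt_succ_iff_lt_or_eq.mp h with h' | h'
    · rw [← ih h']
      have hm : ∃ w : Nat, m = (i + 1) + w := ⟨m - (i + 1), by omega⟩
      obtain ⟨w, rfl⟩ := hm
      show (S a b c (i + 1 + w) + (tb (a.getD (i+1+w) 0) + tb (b.getD (i+1+w) 0)) * 2 ^ (i + 1 + w)) / 2 ^ i % 2 = _
      set t := tb (a.getD (i+1+w) 0) + tb (b.getD (i+1+w) 0)
      have h2 : t * 2 ^ (i + 1 + w) = (2 * (t * 2 ^ w)) * 2 ^ i := by ring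
      rw [h2, Int.add_mul_ediv_right _ _ (by positivity : (0:Int) < 2 ^ i).ne', Int.add_mul_emod_self_left]
    · subst h'; rfl

theorem tb_of_bit (x : Int) (h0 : 0 ≤ x) (h1 : x ≤ 1) : tb x = x := by
  unfold tb; interval_cases x <;> simp

theorem q_bounds (a b : List Int) (c : Int) (k : Nat) :
    0 ≤ S a b c k / 2 ^ k ∧ S a b c k / 2 ^ k ≤ 1 := by
  have hb := S_bounds a b c k
  have hp : (0:Int) < 2 ^ k := by positivity
  constructor
  · exact Int.ediv_nonneg hb.1 (le_of_lt hp)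
  · have : S a b c k / 2 ^ k < 2 := by
      rw [Int.ediv_lt_iff_lt_mul hp]; rw [pow_succ] at hb; nlinarith [hb.2]
    omega

-- B's fold computes the bit sum
theorem foldB_eq (a b : List Int) (c : Int) (k : Nat) :
    (PySem.List.pyRange 0 (k : Int) 1).foldl
      (fun s i =>
        let s1 := if PySem.List.pyGetD a i 0 ≠ 0 then s + 2 ^ i.toNat else s
        if PySem.List.pyGetD b i 0 ≠ 0 then s1 + 2 ^ i.toNat else s1)
      (if c ≠ 0 then 1 else 0) = S a b c k := by
  induction k with
  | zero => simp [PySem.List.pyRange_zero_nat, S, tb]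
  | succ k ih =>
    have hcast : ((k + 1 : Nat) : Int) = (k : Int) + 1 := by push_cast; ring
    rw [hcast, PySem.List.pyRange_one_succ_right (by positivity), List.foldl_append, ih]
    simp only [List.foldl_cons, List.foldl_nil, PySem.List.pyGetD_natCast, Int.toNat_natCast]
    simp only [S]
    by_cases ha : a.getD k 0 = 0 <;> by_cases hb : b.getD k 0 = 0 <;>
      (simp only [List.getD_eq_getElem?_getD] at ha hb; simp [tb, ha, hb]) <;> ring

-- A's fold invariant
theorem foldA_eq (a b : List Int) (c : Int) (n k : Nat) (hkn : k ≤ n) :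
    (PySem.List.pyRange 0 (k : Int) 1).foldl
      (fun (st : Int × List Int × Int) i =>
        let hl := FULL_ADDg (PySem.List.pyGetD a i 0) (PySem.List.pyGetD b i 0) st.2.2
        (hl.1, st.2.1.set i.toNat hl.2, hl.1))
      (0, List.replicate n 0, c)
    = (if k = 0 then 0 else S a b c k / 2 ^ k,
       (List.range n).map (fun i => if i < k then S a b c (i + 1) / 2 ^ i % 2 else 0),
       if k = 0 then c else S a b c k / 2 ^ k) := by
  induction k with
  | zero =>
    simp [PySem.List.pyRange_zero_nat, List.map_const', List.eq_replicate_iff]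
  | succ k ih =>
    have hcast : ((k + 1 : Nat) : Int) = (k : Int) + 1 := by push_cast; ring
    rw [hcast, PySem.List.pyRange_one_succ_right (by positivity), List.foldl_append,
        ih (by omega)]
    simp only [List.foldl_cons, List.foldl_nil, PySem.List.pyGetD_natCast, Int.toNat_natCast,
      full_add_eq]
    have htb : tb (if k = 0 then c else S a b c k / 2 ^ k) = S a b c k / 2 ^ k := by
      by_cases hk : k = 0
      · subst hk; simp [S, pow_zero, Int.ediv_one]
      · have := q_bounds a b c k
        simp only [hk, if_false]
        exact tb_of_bit _ this.1 this.2
    set qk := S a b c k / 2 ^ k with hqk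
    have hrem : S a b c k = qk * 2 ^ k + S a b c k % 2 ^ k := by
      rw [hqk, mul_comm]; exact (Int.ediv_add_emod _ _).symm
    have hp : (0:Int) < 2 ^ k := by positivity
    have hr0 : 0 ≤ S a b c k % 2 ^ k := Int.emod_nonneg _ (ne_of_gt hp)
    have hr1 : S a b c k % 2 ^ k < 2 ^ k := Int.emod_lt_of_pos _ hp
    have hSk1 : S a b c (k + 1) = (tb (a.getD k 0) + tb (b.getD k 0) + qk) * 2 ^ k + S a b c k % 2 ^ k := by
      simp only [S]
      conv_lhs => rw [hrem]
      ring
    have hds := div_shift (tb (a.getD k 0) + tb (b.getD k 0) + qk) (S a b c k % 2 ^ k) k hr0 hr1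
    have hcarry : (tb (a.getD k 0) + tb (b.getD k 0) + qk) / 2 = S a b c (k + 1) / 2 ^ (k + 1) := by
      rw [hSk1]; exact hds.1.symm
    have hbit : (tb (a.getD k 0) + tb (b.getD k 0) + qk) % 2 = S a b c (k + 1) / 2 ^ k % 2 := by
      rw [hSk1]; exact hds.2.symm
    refine Prod.ext ?_ (Prod.ext ?_ ?_) <;> simp only [htb]
    · simpa using hcarry
    · -- the set of the result list
      apply List.ext_getElem
      · simp
      · intro i hi1 hi2
        simp only [List.getElem_set, List.getElem_map, List.getElem_range] at *
        by_cases hik : i = k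
        · subst hik
          simp only [List.getD_eq_getElem?_getD] at hbit
          simp [Nat.lt_succ_self, hbit]
        · rw [if_neg (fun h => hik h.symm)]
          rcases Nat.lt_or_ge i k with hlt | hge
          · rw [if_pos hlt, if_pos (Nat.lt_succ_of_lt hlt)]
          · rw [if_neg (by omega : ¬ i < k), if_neg (by omega : ¬ i < k + 1)]
    · simpa using hcarry

theorem main_eq (a b : List Int) (c : Int) (hpre : a.length ≤ b.length)
    (hd : ¬ D_MULTI_BIT_ADD a b c) : MULTI_BIT_ADD a b c = MULTI_BIT_ADD_alt a b c := by
  unfold MULTI_BIT_ADD MULTI_BIT_ADD_alt rippleLoop bitSum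
  rw [foldB_eq a b c a.length, foldA_eq a b c a.length a.length le_rfl]
  have hp : ∀ k : Nat, (0:Int) < 2 ^ k := fun k => by positivity
  have hfd : ∀ k : Nat, PySem.Int.floordiv (S a b c a.length) (2 ^ k) = S a b c a.length / 2 ^ k :=
    fun k => PySem.Int.floordiv_eq_ediv_of_pos (hp k)
  refine Prod.ext ?_ ?_
  · -- carries
    show (if a.length = 0 then 0 else S a b c a.length / 2 ^ a.length)
        = PySem.Int.mod (PySem.Int.floordiv (S a b c a.length) (2 ^ a.length)) 2
    rw [PySem.Int.mod_eq_emod_of_pos (by norm_num), hfd]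
    have hq := q_bounds a b c a.length
    by_cases hn : a.length = 0
    · have hae : a = [] := List.length_eq_zero_iff.mp hn
      have hc : c = 0 := by
        by_contra hc; exact hd ⟨hae, hc⟩
      simp [hn, hc, S, tb]
    · simp only [hn, if_false]
      omega
  · -- result lists
    show (List.range a.length).map (fun i => if i < a.length then S a b c (i + 1) / 2 ^ i % 2 else 0)
        = (PySem.List.pyRange 0 (a.length : Int) 1).map
            (fun i => PySem.Int.mod (PySem.Int.floordiv (S a b c a.length) (2 ^ i.toNat)) 2)
    rw [PySem.List.pyRange_one]
    simp only [sub_zero, Int.toNat_natCast, List.map_map]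
    apply List.ext_getElem
    · simp
    · intro i hi1 hi2
      simp only [List.getElem_map, List.getElem_range, Function.comp_apply]
      have hiln : i < a.length := by simpa using hi1
      rw [PySem.Int.mod_eq_emod_of_pos (by norm_num), hfd]
      simp only [hiln, if_true, zero_add, Int.toNat_natCast]
      exact (S_bit_stable a b c i a.length hiln).symm

-- ===== VERDICT (by name: the statement is the Claim_ definition above) =====
theorem MULTI_BIT_ADD_spec : Claim_unchanged_MULTI_BIT_ADD := by
  intro a b c _ hpre hd
  exact main_eq a b c hpre hd

theorem MULTI_BIT_ADD_changed : Claim_changed_MULTI_BIT_ADD := by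
  unfold Claim_changed_MULTI_BIT_ADD; decide

theorem MULTI_BIT_ADD_tight : Claim_exact_MULTI_BIT_ADD := by
  intro a b c _ _ hd
  obtain ⟨hae, hc⟩ := hd
  subst hae
  intro heq
  have hA : (MULTI_BIT_ADD [] b c).1 = 0 := by
    simp [MULTI_BIT_ADD, rippleLoop, PySem.List.pyRange_one_eq_nil]
  have hB : (MULTI_BIT_ADD_alt [] b c).1 = 1 := by
    simp only [MULTI_BIT_ADD_alt, bitSum, List.length_nil, Nat.cast_zero,
      PySem.List.pyRange_one_eq_nil le_rfl, List.foldl_nil, hc, if_true, ne_eq,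
      not_false_eq_true, pow_zero]
    decide
  rw [heq, hB] at hA
  exact absurd hA (by norm_num)
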